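-- pv_equiv track=rewrite | github.com/hashgraph-online/standards-sdk-py | src/standards_sdk_py/registry_broker/demo_utils.py | _is_sensitive_key
-- ===== SOURCE A (Python) =====
-- def _is_sensitive_key(key: str) -> bool:
--     lowered = key.lower()
--     return any(
--         token in lowered
--         for token in (
--             "api_key",
--             "apikey",
--             "token",
--             "secret",
--             "password",
--             "private",
--             "authorization",
--             "signature",
--         )
--     )
-- ===== SOURCE B (Python) =====
-- _TOKENS = (
--     "api_key",
--     "apikey",
--     "token",
--     "secret",
--     "password",
--     "private",
--     "authorization",
--     "signature",
-- )
--
--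
-- def _is_sensitive_key(key: str) -> bool:
--     lowered = key.lower()
--     for i in range(len(lowered) + 1):
--         for token in _TOKENS:
--             if lowered.startswith(token, i):
--                 return True
--     return False
-- ===== Notes on version B (the rewrite author's own statement) =====
-- stated objective: alternative
-- what changed: Scans the lowered key position by position, testing at each index whether some token starts there (a single position-major sweep), instead of running a separate full substring search for each token.
import Mathlib
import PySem

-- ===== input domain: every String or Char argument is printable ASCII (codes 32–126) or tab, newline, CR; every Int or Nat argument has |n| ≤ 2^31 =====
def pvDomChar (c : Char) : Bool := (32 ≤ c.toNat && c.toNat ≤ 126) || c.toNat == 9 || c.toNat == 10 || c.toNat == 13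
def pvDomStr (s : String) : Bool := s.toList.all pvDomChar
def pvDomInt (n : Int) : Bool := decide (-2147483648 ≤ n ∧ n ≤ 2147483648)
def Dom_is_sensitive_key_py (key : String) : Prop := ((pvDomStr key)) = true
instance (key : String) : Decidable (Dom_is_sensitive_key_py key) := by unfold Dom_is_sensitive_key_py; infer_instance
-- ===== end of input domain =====

-- B replaces A's token-by-token substring searches with a single position-major sweep of the
-- lowered key, checking at each index whether some token starts there (objective: alternative).

-- ===== PORT A =====
def pvTokensA : List String :=
  ["api_key", "apikey", "token", "secret", "password", "private", "authorization", "signature"]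

def is_sensitive_key_py (key : String) : Bool :=
  let lowered := PySem.Str.lower key
  pvTokensA.any (fun token => PySem.Str.isIn token lowered)

-- ===== PORT B =====
def pvTokensB : List (List Char) :=
  ["api_key".toList, "apikey".toList, "token".toList, "secret".toList,
   "password".toList, "private".toList, "authorization".toList, "signature".toList]

-- 'lowered.startswith(token, i)' is 'token is a prefix of lowered from position i':
-- PySem.Chars.startswith on (cs.drop i); 'range(len(lowered) + 1)' is List.range (cs.length + 1).
def is_sensitive_key_py_alt (key : String) : Bool :=
  let cs := PySem.Chars.lower key.toList
  (List.range (cs.length + 1)).any (fun i =>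
    pvTokensB.any (fun token => PySem.Chars.startswith (cs.drop i) token))

-- ===== PRECONDITION & SPEC =====
def Spec_is_sensitive_key_py (key : String) (out : Bool) : Prop := out = is_sensitive_key_py_alt key
instance (key : String) (out : Bool) : Decidable (Spec_is_sensitive_key_py key out) := by unfold Spec_is_sensitive_key_py; infer_instance

-- ===== CLAIM (what is proved, stated in full; the proofs are below) =====
def Claim_equal_is_sensitive_key_py : Prop := ∀ (key : String), Dom_is_sensitive_key_py key → Spec_is_sensitive_key_py key (is_sensitive_key_py key)

-- ===== LEMMAS AND PROOFS =====

theorem pvTokensB_eq : pvTokensB = pvTokensA.map String.toList := by decide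

theorem pvTokensA_ne_nil : ∀ s ∈ pvTokensA, s.toList ≠ [] := by decide

-- a nonempty pattern is an infix iff it is a prefix at some position ≤ length
theorem infix_iff_bounded (t cs : List Char) (ht : t ≠ []) :
    t <:+: cs ↔ ∃ i < cs.length + 1, t <+: cs.drop i := by
  constructor
  · intro h
    obtain ⟨j, hp⟩ := (PySem.Chars.exists_prefix_drop_iff_isIn t cs).2
      ((PySem.Chars.isIn_iff_infix t cs).2 h)
    refine ⟨j, ?_, hp⟩
    by_contra hj
    have hnil : cs.drop j = [] := List.drop_eq_nil_of_le (by omega)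
    rw [hnil] at hp
    exact ht (List.prefix_nil.mp hp)
  · rintro ⟨i, _, hp⟩
    exact (PySem.Chars.isIn_iff_infix t cs).1
      ((PySem.Chars.exists_prefix_drop_iff_isIn t cs).1 ⟨i, hp⟩)

theorem main_any_eq (cs : List Char) :
    pvTokensA.any (fun t => PySem.Chars.isIn t.toList cs) =
      (List.range (cs.length + 1)).any (fun i =>
        pvTokensB.any (fun token => PySem.Chars.startswith (cs.drop i) token)) := by
  rw [pvTokensB_eq, Bool.eq_iff_iff]
  simp only [List.any_eq_true, List.mem_range, List.mem_map,
    PySem.Chars.isIn_iff_infix, PySem.Chars.startswith_iff]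
  constructor
  · rintro ⟨s, hs, hinf⟩
    obtain ⟨i, hi, hp⟩ := (infix_iff_bounded _ _ (pvTokensA_ne_nil s hs)).1 hinf
    exact ⟨i, hi, s.toList, ⟨s, hs, rfl⟩, hp⟩
  · rintro ⟨i, hi, t, ⟨s, hs, rfl⟩, hp⟩
    exact ⟨s, hs, (infix_iff_bounded _ _ (pvTokensA_ne_nil s hs)).2 ⟨i, hi, hp⟩⟩

-- ===== VERDICT (by name: the statement is the Claim_ definition above) =====
theorem is_sensitive_key_py_spec : Claim_equal_is_sensitive_key_py := by
  intro key _
  unfold Spec_is_sensitive_key_py is_sensitive_key_py is_sensitive_key_py_alt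
  simp only [PySem.Str.isIn_eq, PySem.Str.toList_lower]
  exact main_any_eq (PySem.Chars.lower key.toList)
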